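-- pv_equiv track=rewrite | github.com/josephedward/kubelingo | kubelingo/modules/kubernetes/session.py | _recompute_stats
-- ===== SOURCE A (Python) =====
-- def _recompute_stats(questions, attempted_indices, correct_indices):
--     """Helper to calculate per-category stats from state sets."""
--     stats = {}
--     for idx in attempted_indices:
--         q = questions[idx]
--         category = q.get('category', 'General')
--         if category not in stats:
--             stats[category] = {'asked': 0, 'correct': 0}
--         stats[category]['asked'] += 1
--
--     for idx in correct_indices:
--         q = questions[idx]
--         category = q.get('category', 'General')
--         if category not in stats:
--             # This case should not happen if logic is correct, but for safety:
--             stats[category] = {'asked': 1, 'correct': 0}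
--         stats[category]['correct'] += 1
--     return stats
-- ===== SOURCE B (Python) =====
-- def _recompute_stats(questions, attempted_indices, correct_indices):
--     """Count categories first, then assemble the stats dict from the two counters."""
--     def cat(idx):
--         return questions[idx].get('category', 'General')
--
--     asked = {}
--     for idx in attempted_indices:
--         c = cat(idx)
--         asked[c] = asked.get(c, 0) + 1
--
--     correct = {}
--     for idx in correct_indices:
--         c = cat(idx)
--         correct[c] = correct.get(c, 0) + 1
--
--     stats = {c: {'asked': n, 'correct': correct.get(c, 0)} for c, n in asked.items()}
--     for c, n in correct.items():
--         if c not in stats: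
--             stats[c] = {'asked': 1, 'correct': n}
--     return stats
-- ===== Notes on version B (the rewrite author's own statement) =====
-- stated objective: alternative
-- what changed: B replaces A's single mutated nested dict-of-dicts with two flat category counters built first and a separate assembly phase (a dict comprehension plus one fill-in loop for correct-only categories), reproducing A's asked=1 corner naturally; Pre_ only excludes out-of-range indices, on which both raise IndexError.
import Mathlib
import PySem

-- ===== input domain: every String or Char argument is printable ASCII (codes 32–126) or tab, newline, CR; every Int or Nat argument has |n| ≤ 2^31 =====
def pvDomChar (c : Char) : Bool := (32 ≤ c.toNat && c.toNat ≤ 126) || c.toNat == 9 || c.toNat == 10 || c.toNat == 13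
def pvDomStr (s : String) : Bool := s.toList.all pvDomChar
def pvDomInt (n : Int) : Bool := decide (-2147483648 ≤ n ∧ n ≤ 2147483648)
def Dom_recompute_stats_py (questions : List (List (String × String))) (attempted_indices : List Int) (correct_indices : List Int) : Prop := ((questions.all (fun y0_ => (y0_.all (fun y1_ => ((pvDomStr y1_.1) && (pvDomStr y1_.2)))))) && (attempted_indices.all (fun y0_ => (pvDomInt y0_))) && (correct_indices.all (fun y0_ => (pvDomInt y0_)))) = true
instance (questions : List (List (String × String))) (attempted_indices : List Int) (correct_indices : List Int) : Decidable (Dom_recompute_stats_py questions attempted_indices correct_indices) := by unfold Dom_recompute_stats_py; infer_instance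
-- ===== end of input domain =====

-- B recomputes the same per-category stats by building two flat category counters first and assembling
-- the result afterwards (alternative decomposition, same cost), instead of A's in-place nested dict mutation.
-- ===== PORT A =====
def pvCat (q : List (String × String)) : String :=
  (PySem.Dict.mk q).getD "category" "General"

def pvStepA1 (stats : PySem.Dict String (PySem.Dict String Int)) (c : String) : PySem.Dict String (PySem.Dict String Int) :=
  let stats := if stats.contains c then stats else stats.insert c (PySem.Dict.mk [("asked", 0), ("correct", 0)])
  stats.modify c PySem.Dict.empty (fun d => d.modify "asked" 0 (· + 1))

def pvStepA2 (stats : PySem.Dict String (PySem.Dict String Int)) (c : String) : PySem.Dict String (PySem.Dict String Int) :=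
  let stats := if stats.contains c then stats else stats.insert c (PySem.Dict.mk [("asked", 1), ("correct", 0)])
  stats.modify c PySem.Dict.empty (fun d => d.modify "correct" 0 (· + 1))

def recompute_stats_py (questions : List (List (String × String))) (attempted_indices : List Int) (correct_indices : List Int) : List (String × List (String × Int)) :=
  let stats : PySem.Dict String (PySem.Dict String Int) := PySem.Dict.empty
  let stats := attempted_indices.foldl (fun stats idx =>
    pvStepA1 stats (pvCat (PySem.List.pyGetD questions idx []))) stats
  let stats := correct_indices.foldl (fun stats idx =>
    pvStepA2 stats (pvCat (PySem.List.pyGetD questions idx []))) stats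
  stats.items.map (fun p => (p.1, p.2.items))

-- ===== PORT B =====
def pvCounterCats (questions : List (List (String × String))) (idxs : List Int) : PySem.Dict String Int :=
  idxs.foldl (fun d idx =>
    let c := pvCat (PySem.List.pyGetD questions idx [])
    d.insert c (d.getD c 0 + 1)) PySem.Dict.empty

def recompute_stats_py_alt (questions : List (List (String × String))) (attempted_indices : List Int) (correct_indices : List Int) : List (String × List (String × Int)) :=
  let asked := pvCounterCats questions attempted_indices
  let corr := pvCounterCats questions correct_indices
  let stats : PySem.Dict String (PySem.Dict String Int) :=
    asked.items.foldl (fun s p =>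
      s.insert p.1 (PySem.Dict.mk [("asked", p.2), ("correct", corr.getD p.1 0)])) PySem.Dict.empty
  let stats := corr.items.foldl (fun s p =>
    if s.contains p.1 then s else s.insert p.1 (PySem.Dict.mk [("asked", 1), ("correct", p.2)])) stats
  stats.items.map (fun p => (p.1, p.2.items))

-- ===== PRECONDITION & SPEC =====
-- Pre_ excludes exactly the inputs on which Python A raises IndexError (an index out of range of questions).
def Pre_recompute_stats_py (questions : List (List (String × String))) (attempted_indices : List Int) (correct_indices : List Int) : Prop :=
  (∀ i ∈ attempted_indices, PySem.Raise.InRange questions.length i) ∧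
  (∀ i ∈ correct_indices, PySem.Raise.InRange questions.length i)
instance (questions : List (List (String × String))) (attempted_indices : List Int) (correct_indices : List Int) : Decidable (Pre_recompute_stats_py questions attempted_indices correct_indices) := by unfold Pre_recompute_stats_py; infer_instance
def pvWitness_recompute_stats_py : (List (List (String × String))) × List Int × List Int :=
  ([[("category", "net")], [("q", "z")]], [0, 1, 0], [-2, 0])
def Spec_recompute_stats_py (questions : List (List (String × String))) (attempted_indices : List Int) (correct_indices : List Int) (out : List (String × List (String × Int))) : Prop := out = recompute_stats_py_alt questions attempted_indices correct_indices
instance (questions : List (List (String × String))) (attempted_indices : List Int) (correct_indices : List Int) (out : List (String × List (String × Int))) : Decidable (Spec_recompute_stats_py questions attempted_indices correct_indices out) := by unfold Spec_recompute_stats_py; infer_instance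

-- ===== CLAIM (what is proved, stated in full; the proofs are below) =====
def Claim_equal_recompute_stats_py : Prop := ∀ (questions : List (List (String × String))) (attempted_indices : List Int) (correct_indices : List Int), Dom_recompute_stats_py questions attempted_indices correct_indices → Pre_recompute_stats_py questions attempted_indices correct_indices → Spec_recompute_stats_py questions attempted_indices correct_indices (recompute_stats_py questions attempted_indices correct_indices)

-- ===== LEMMAS AND PROOFS =====

-- Inner-dict computations
lemma pvInner_asked (n m : Int) :
    (PySem.Dict.mk [("asked", n), ("correct", m)]).modify "asked" 0 (· + 1)
      = PySem.Dict.mk [("asked", n + 1), ("correct", m)] := by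
  apply PySem.Dict.ext
  simp [PySem.Dict.modify, PySem.Dict.insert, PySem.Dict.getD, PySem.Dict.get?_mk_cons]

lemma pvInner_correct (n m : Int) :
    (PySem.Dict.mk [("asked", n), ("correct", m)]).modify "correct" 0 (· + 1)
      = PySem.Dict.mk [("asked", n), ("correct", m + 1)] := by
  apply PySem.Dict.ext
  simp [PySem.Dict.modify, PySem.Dict.insert, PySem.Dict.getD, PySem.Dict.get?_mk_cons]

-- State of A's first loop after processing category list p, and of the second loop
def pvRepr1 (p : List String) : PySem.Dict String (PySem.Dict String Int) :=
  PySem.Dict.mk ((PySem.Set.ofList p).map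
    (fun c => (c, PySem.Dict.mk [("asked", (p.count c : Int)), ("correct", 0)])))

def pvReprF (xs p : List String) : PySem.Dict String (PySem.Dict String Int) :=
  PySem.Dict.mk
    ((PySem.Set.ofList xs).map
      (fun c => (c, PySem.Dict.mk [("asked", (xs.count c : Int)), ("correct", (p.count c : Int))])) ++
     ((PySem.Set.ofList p).filter (fun c => !(xs.contains c))).map
      (fun c => (c, PySem.Dict.mk [("asked", 1), ("correct", (p.count c : Int))])))

lemma pvKeys_repr1 (p : List String) : (pvRepr1 p).keys = PySem.Set.ofList p := by
  simp [pvRepr1, PySem.Dict.keys, Function.comp_def]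

lemma pvNodupKeys_repr1 (p : List String) : (pvRepr1 p).keys.Nodup := by
  rw [pvKeys_repr1]; exact PySem.Set.nodup_ofList p

lemma pvModify_eq {κ ν : Type} [BEq κ] (d : PySem.Dict κ ν) (k : κ) (d0 : ν) (f : ν → ν) :
    d.modify k d0 f = d.insert k (f (d.getD k d0)) := rfl

lemma pvStepA1_repr1 (p : List String) (x : String) :
    pvStepA1 (pvRepr1 p) x = pvRepr1 (p ++ [x]) := by
  by_cases hx : x ∈ p
  · have hc : (pvRepr1 p).contains x = true := by
      rw [PySem.Dict.contains_iff_mem_keys, pvKeys_repr1]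
      exact (PySem.Set.mem_ofList _ _).mpr hx
    have hmem : (x, PySem.Dict.mk [("asked", (p.count x : Int)), ("correct", 0)]) ∈ (pvRepr1 p).items := by
      simp only [pvRepr1]
      exact List.mem_map.mpr ⟨x, (PySem.Set.mem_ofList _ _).mpr hx, rfl⟩
    have hval : (pvRepr1 p).getD x PySem.Dict.empty
        = PySem.Dict.mk [("asked", (p.count x : Int)), ("correct", 0)] :=
      PySem.Dict.getD_of_mem_items _ hmem (pvNodupKeys_repr1 p) _
    simp only [pvStepA1, hc, if_true]
    rw [pvModify_eq, hval]
    simp only [pvInner_asked]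
    apply PySem.Dict.ext
    rw [PySem.Dict.items_insert_of_contains _ _ hc]
    have hset : PySem.Set.ofList (p ++ [x]) = PySem.Set.ofList p := by
      rw [PySem.Set.ofList_append_singleton,
          PySem.Set.add_of_mem ((PySem.Set.mem_ofList _ _).mpr hx)]
    simp only [pvRepr1, hset, List.map_map]
    apply List.map_congr_left
    intro c hc'
    by_cases hcx : c = x
    · subst hcx
      simp [Function.comp_def, List.count_append]
    · simp [Function.comp_def, hcx, Ne.symm hcx, List.count_append, List.count_cons]
  · have hc : (pvRepr1 p).contains x = false := by
      rw [← Bool.not_eq_true, PySem.Dict.contains_iff_mem_keys, pvKeys_repr1]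
      simpa using hx
    simp only [pvStepA1, hc, Bool.false_eq_true, if_false]
    rw [pvModify_eq, PySem.Dict.getD_insert_self]
    simp only [pvInner_asked, PySem.Dict.insert_insert_self]
    apply PySem.Dict.ext
    rw [PySem.Dict.items_insert_of_not_contains _ _ hc]
    have hset : PySem.Set.ofList (p ++ [x]) = PySem.Set.ofList p ++ [x] := by
      rw [PySem.Set.ofList_append_singleton,
          PySem.Set.add_of_not_mem (by simpa using hx)]
    have hcnt : p.count x = 0 := List.count_eq_zero.mpr hx
    simp only [pvRepr1, hset, List.map_append, List.map_singleton, List.count_append,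
      hcnt, List.count_singleton]
    congr 1
    · apply List.map_congr_left
      intro c hc'
      have hcp : c ∈ p := (PySem.Set.mem_ofList _ _).mp hc'
      have hne : x ≠ c := by rintro rfl; exact hx hcp
      simp [hne, List.count_append, List.count_cons]
    · norm_num

lemma pvFoldA1 (xs p : List String) :
    xs.foldl pvStepA1 (pvRepr1 p) = pvRepr1 (p ++ xs) := by
  induction xs generalizing p with
  | nil => simp
  | cons x xs ih =>
      simp only [List.foldl_cons, pvStepA1_repr1]
      rw [ih]; simp

lemma pvKeys_reprF (xs p : List String) :
    (pvReprF xs p).keys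
      = PySem.Set.ofList xs ++ (PySem.Set.ofList p).filter (fun c => !(xs.contains c)) := by
  simp [pvReprF, PySem.Dict.keys, Function.comp_def]

lemma pvNodupKeys_reprF (xs p : List String) : (pvReprF xs p).keys.Nodup := by
  rw [pvKeys_reprF]
  refine List.Nodup.append (PySem.Set.nodup_ofList xs)
    (List.Nodup.filter _ (PySem.Set.nodup_ofList p)) ?_
  intro a ha hb
  have h2 := (List.mem_filter.mp hb).2
  have hax : a ∈ xs := (PySem.Set.mem_ofList _ _).mp ha
  simp only [Bool.not_eq_eq_eq_not, Bool.not_true, List.contains_eq_mem,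
    decide_eq_false_iff_not] at h2
  exact h2 hax

lemma pvContains_reprF (xs p : List String) (y : String) :
    (pvReprF xs p).contains y = true ↔ (y ∈ xs ∨ y ∈ p) := by
  rw [PySem.Dict.contains_iff_mem_keys, pvKeys_reprF]
  simp only [List.mem_append, List.mem_filter, PySem.Set.mem_ofList,
    Bool.not_eq_eq_eq_not, Bool.not_true, List.contains_eq_mem, decide_eq_false_iff_not]
  tauto

lemma pvVal_reprF_left (xs p : List String) (y : String) (hy : y ∈ xs) :
    (pvReprF xs p).getD y PySem.Dict.empty
      = PySem.Dict.mk [("asked", (xs.count y : Int)), ("correct", (p.count y : Int))] := by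
  refine PySem.Dict.getD_of_mem_items _ ?_ (pvNodupKeys_reprF xs p) _
  simp only [pvReprF]
  exact List.mem_append_left _ (List.mem_map.mpr ⟨y, (PySem.Set.mem_ofList _ _).mpr hy, rfl⟩)

lemma pvVal_reprF_right (xs p : List String) (y : String) (hy1 : y ∉ xs) (hy2 : y ∈ p) :
    (pvReprF xs p).getD y PySem.Dict.empty
      = PySem.Dict.mk [("asked", 1), ("correct", (p.count y : Int))] := by
  refine PySem.Dict.getD_of_mem_items _ ?_ (pvNodupKeys_reprF xs p) _
  simp only [pvReprF]
  refine List.mem_append_right _ (List.mem_map.mpr ⟨y, List.mem_filter.mpr ⟨?_, ?_⟩, rfl⟩)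
  · exact (PySem.Set.mem_ofList _ _).mpr hy2
  · simp [hy1]

lemma pvFilter_snoc_of_mem_xs (xs p : List String) (y : String) (hy : y ∈ xs) :
    (PySem.Set.ofList (p ++ [y])).filter (fun c => !(xs.contains c))
      = (PySem.Set.ofList p).filter (fun c => !(xs.contains c)) := by
  rw [PySem.Set.ofList_append_singleton, PySem.Set.add_eq_ite]
  split_ifs with h
  · rfl
  · rw [List.filter_append]
    simp [hy]

lemma pvStepA2_reprF (xs p : List String) (y : String) :
    pvStepA2 (pvReprF xs p) y = pvReprF xs (p ++ [y]) := by
  by_cases hyx : y ∈ xs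
  · have hc : (pvReprF xs p).contains y = true := (pvContains_reprF xs p y).mpr (Or.inl hyx)
    simp only [pvStepA2, hc, if_true]
    rw [pvModify_eq, pvVal_reprF_left xs p y hyx]
    simp only [pvInner_correct]
    apply PySem.Dict.ext
    rw [PySem.Dict.items_insert_of_contains _ _ hc]
    simp only [pvReprF, List.map_append, List.map_map]
    rw [pvFilter_snoc_of_mem_xs xs p y hyx]
    congr 1
    · apply List.map_congr_left
      intro c hc'
      by_cases hcy : c = y
      · subst hcy
        simp [Function.comp_def, List.count_append]
      · simp [Function.comp_def, hcy, List.count_append, List.count_cons, Ne.symm hcy]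
    · apply List.map_congr_left
      intro c hc'
      have hcnx : c ∉ xs := by
        have h2 := (List.mem_filter.mp hc').2
        simp only [Bool.not_eq_eq_eq_not, Bool.not_true, List.contains_eq_mem,
          decide_eq_false_iff_not] at h2
        exact h2
      have hcy : c ≠ y := by rintro rfl; exact hcnx hyx
      simp [Function.comp_def, hcy, List.count_append, List.count_cons, Ne.symm hcy]
  · by_cases hyp : y ∈ p
    · have hc : (pvReprF xs p).contains y = true := (pvContains_reprF xs p y).mpr (Or.inr hyp)
      simp only [pvStepA2, hc, if_true]
      rw [pvModify_eq, pvVal_reprF_right xs p y hyx hyp]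
      simp only [pvInner_correct]
      apply PySem.Dict.ext
      rw [PySem.Dict.items_insert_of_contains _ _ hc]
      simp only [pvReprF, List.map_append, List.map_map]
      have hset : PySem.Set.ofList (p ++ [y]) = PySem.Set.ofList p := by
        rw [PySem.Set.ofList_append_singleton,
            PySem.Set.add_of_mem ((PySem.Set.mem_ofList _ _).mpr hyp)]
      rw [hset]
      congr 1
      · apply List.map_congr_left
        intro c hc'
        have hcy : c ≠ y := by
          rintro rfl; exact hyx ((PySem.Set.mem_ofList _ _).mp hc')
        simp [Function.comp_def, hcy, List.count_append, List.count_cons, Ne.symm hcy]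
      · apply List.map_congr_left
        intro c hc'
        by_cases hcy : c = y
        · subst hcy
          simp [Function.comp_def, List.count_append]
        · simp [Function.comp_def, hcy, List.count_append, List.count_cons, Ne.symm hcy]
    · have hc : (pvReprF xs p).contains y = false := by
        rw [← Bool.not_eq_true]
        intro h
        rcases (pvContains_reprF xs p y).mp h with h' | h'
        · exact hyx h'
        · exact hyp h'
      simp only [pvStepA2, hc, Bool.false_eq_true, if_false]
      rw [pvModify_eq, PySem.Dict.getD_insert_self]
      simp only [pvInner_correct, PySem.Dict.insert_insert_self]
      apply PySem.Dict.ext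
      rw [PySem.Dict.items_insert_of_not_contains _ _ hc]
      have hset : PySem.Set.ofList (p ++ [y]) = PySem.Set.ofList p ++ [y] := by
        rw [PySem.Set.ofList_append_singleton,
            PySem.Set.add_of_not_mem (by simpa using hyp)]
      have hcnt : p.count y = 0 := List.count_eq_zero.mpr hyp
      simp only [pvReprF, hset, List.filter_append, List.map_append]
      have hfy : List.filter (fun c => !(xs.contains c)) [y] = [y] := by simp [hyx]
      rw [hfy, List.append_assoc]
      congr 1
      · apply List.map_congr_left
        intro c hc'
        have hcy : c ≠ y := by
          rintro rfl; exact hyx ((PySem.Set.mem_ofList _ _).mp hc')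
        simp [hcy, List.count_append, List.count_cons, Ne.symm hcy]
      congr 1
      · apply List.map_congr_left
        intro c hc'
        have hcy : c ≠ y := by
          rintro rfl; exact hyp ((PySem.Set.mem_ofList _ _).mp (List.mem_filter.mp hc').1)
        simp [hcy, List.count_append, List.count_cons, Ne.symm hcy]
      · simp [hcnt]

lemma pvFoldA2 (xs ys p : List String) :
    ys.foldl pvStepA2 (pvReprF xs p) = pvReprF xs (p ++ ys) := by
  induction ys generalizing p with
  | nil => simp
  | cons y ys ih =>
      simp only [List.foldl_cons, pvStepA2_reprF]
      rw [ih]; simp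

lemma pvRepr1_eq_reprF (xs : List String) : pvRepr1 xs = pvReprF xs [] := by
  simp [pvRepr1, pvReprF]

-- A's result as a function of the two category lists
lemma pvA_eq (xs ys : List String) :
    ys.foldl pvStepA2 (xs.foldl pvStepA1 PySem.Dict.empty) = pvReprF xs ys := by
  have h0 : (PySem.Dict.empty : PySem.Dict String (PySem.Dict String Int)) = pvRepr1 [] := by
    simp [pvRepr1, PySem.Dict.empty]
  rw [h0]
  have h1 := pvFoldA1 xs []
  simp only [List.nil_append] at h1
  rw [h1, pvRepr1_eq_reprF]
  have h2 := pvFoldA2 xs ys []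
  simpa using h2

-- B's second loop: skip-or-append over a list with distinct keys
lemma pvFoldB2 (l : List (String × Int)) (s : PySem.Dict String (PySem.Dict String Int))
    (hl : (l.map (·.1)).Nodup) :
    (l.foldl (fun s p => if s.contains p.1 then s
        else s.insert p.1 (PySem.Dict.mk [("asked", 1), ("correct", p.2)])) s).items
      = s.items ++ (l.filter (fun p => !(s.contains p.1))).map
          (fun p => (p.1, PySem.Dict.mk [("asked", 1), ("correct", p.2)])) := by
  induction l generalizing s with
  | nil => simp
  | cons q l ih =>
      rw [List.map_cons] at hl
      have hq := (List.nodup_cons.mp hl).1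
      have hl' := (List.nodup_cons.mp hl).2
      simp only [List.foldl_cons, List.filter_cons]
      by_cases h : s.contains q.1 = true
      · simp only [h, if_true, Bool.not_true, Bool.false_eq_true, if_false]
        exact ih s hl'
      · have h' : s.contains q.1 = false := by
          rw [← Bool.not_eq_true]; exact h
        simp only [h', Bool.false_eq_true, if_false, Bool.not_false, if_true]
        rw [ih _ hl', PySem.Dict.items_insert_of_not_contains _ _ h']
        rw [List.filter_congr (q := fun p => !(s.contains p.1)) ?_]
        · simp
        · intro r hr
          have hrq : r.1 ≠ q.1 := by
            intro he
            exact hq (he ▸ List.mem_map.mpr ⟨r, hr, rfl⟩)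
          rw [PySem.Dict.contains_insert]
          simp [hrq]

lemma pvContains_mkmap (xs : List String) (v : String → PySem.Dict String Int) (k : String) :
    (PySem.Dict.mk ((PySem.Set.ofList xs).map (fun c => (c, v c)))).contains k = xs.contains k := by
  have hkeys : (PySem.Dict.mk ((PySem.Set.ofList xs).map (fun c => (c, v c)))).keys
      = PySem.Set.ofList xs := by
    simp [PySem.Dict.keys, Function.comp_def]
  by_cases hk : k ∈ xs
  · have h : (PySem.Dict.mk ((PySem.Set.ofList xs).map (fun c => (c, v c)))).contains k = true := by
      rw [PySem.Dict.contains_iff_mem_keys, hkeys]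
      exact (PySem.Set.mem_ofList _ _).mpr hk
    rw [h]; simp [hk]
  · have h : ¬ (PySem.Dict.mk ((PySem.Set.ofList xs).map (fun c => (c, v c)))).contains k = true := by
      rw [PySem.Dict.contains_iff_mem_keys, hkeys, PySem.Set.mem_ofList]
      exact hk
    rw [Bool.not_eq_true] at h
    rw [h]; simp [hk]

-- B's result as a function of the two category lists
lemma pvB_eq (xs ys : List String) :
    ((PySem.Dict.counter ys).items.foldl
       (fun s p => if s.contains p.1 then s
          else s.insert p.1 (PySem.Dict.mk [("asked", 1), ("correct", p.2)]))
       ((PySem.Dict.counter xs).items.foldl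
          (fun s p => s.insert p.1
            (PySem.Dict.mk [("asked", p.2), ("correct", (PySem.Dict.counter ys).getD p.1 0)]))
          PySem.Dict.empty))
      = pvReprF xs ys := by
  have hnx : ((PySem.Dict.counter xs).items.map (·.1)).Nodup := PySem.Dict.nodup_keys_counter xs
  have hny : ((PySem.Dict.counter ys).items.map (·.1)).Nodup := PySem.Dict.nodup_keys_counter ys
  have h1 : ((PySem.Dict.counter xs).items.foldl
      (fun s p => s.insert p.1
        (PySem.Dict.mk [("asked", p.2), ("correct", (PySem.Dict.counter ys).getD p.1 0)]))
      PySem.Dict.empty)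
      = PySem.Dict.mk ((PySem.Set.ofList xs).map
          (fun c => (c, PySem.Dict.mk [("asked", (xs.count c : Int)), ("correct", (ys.count c : Int))]))) := by
    apply PySem.Dict.ext
    rw [PySem.Dict.items_foldl_insert_fresh _ _ _ _ (fun a _ => PySem.Dict.contains_empty _) hnx]
    simp [PySem.Dict.items_counter, List.map_map, PySem.Dict.getD_counter, Function.comp_def, PySem.Dict.empty]
  rw [h1]
  have hcont := pvContains_mkmap xs
      (fun c => PySem.Dict.mk [("asked", (xs.count c : Int)), ("correct", (ys.count c : Int))])
  apply PySem.Dict.ext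
  rw [pvFoldB2 _ _ hny]
  simp only [pvReprF]
  congr 1
  rw [List.filter_congr (q := fun p => !(xs.contains p.1)) (fun r _ => by rw [hcont r.1])]
  rw [PySem.Dict.items_counter]
  rw [List.filter_map, List.map_map]
  congr 1

-- ===== VERDICT (by name: the statement is the Claim_ definition above) =====
theorem recompute_stats_py_spec : Claim_equal_recompute_stats_py := by
  intro qs ai ci _ _
  unfold Spec_recompute_stats_py recompute_stats_py recompute_stats_py_alt
  have e1 : pvCounterCats qs ai
      = PySem.Dict.counter (ai.map (fun idx => pvCat (PySem.List.pyGetD qs idx []))) := by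
    unfold pvCounterCats
    rw [← PySem.Dict.foldl_insert_getD_add_one_eq_counter, List.foldl_map]
  have e2 : pvCounterCats qs ci
      = PySem.Dict.counter (ci.map (fun idx => pvCat (PySem.List.pyGetD qs idx []))) := by
    unfold pvCounterCats
    rw [← PySem.Dict.foldl_insert_getD_add_one_eq_counter, List.foldl_map]
  simp only [e1, e2, pvB_eq]
  rw [← List.foldl_map (f := fun idx => pvCat (PySem.List.pyGetD qs idx []))
        (g := pvStepA1) (l := ai) (init := PySem.Dict.empty)]
  rw [← List.foldl_map (f := fun idx => pvCat (PySem.List.pyGetD qs idx []))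
        (g := pvStepA2) (l := ci)]
  rw [pvA_eq]
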